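-- pv_equiv track=rewrite | github.com/shepherdjay/reddit_challenges | challenges/challenge381_ez.py | yahtzee_upper
-- ===== SOURCE A (Python) =====
-- from typing import List
--
-- def yahtzee_upper(dice_roll: List):
--   results_dict = {}
--   for value in dice_roll:
--     current_value = results_dict.get(value, 0)
--     results_dict[value] = current_value + value
--
--   cur_max = 0
--   for k, v in results_dict.items():
--     if v > cur_max:
--         cur_max = v
--
--   return cur_max, len(results_dict)
-- ===== SOURCE B (Python) =====
-- def yahtzee_upper(dice_roll):
--     # Sort a copy, scan consecutive equal runs, keep the best run sum (clamped at 0)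
--     # and count the runs (= distinct values).
--     best = 0
--     run = 0
--     distinct = 0
--     prev = None
--     for v in sorted(dice_roll):
--         if prev is not None and v == prev:
--             run += v
--         else:
--             if run > best:
--                 best = run
--             run = v
--             distinct += 1
--         prev = v
--     if run > best:
--         best = run
--     return best, distinct
-- ===== Notes on version B (the rewrite author's own statement) =====
-- stated objective: alternative
-- what changed: Replaces A's hash-map of running per-value sums plus a second max-scan over its items by sorting a copy of the dice and scanning consecutive equal runs once, folding each run's sum into the running best and counting the runs.
import Mathlib
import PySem

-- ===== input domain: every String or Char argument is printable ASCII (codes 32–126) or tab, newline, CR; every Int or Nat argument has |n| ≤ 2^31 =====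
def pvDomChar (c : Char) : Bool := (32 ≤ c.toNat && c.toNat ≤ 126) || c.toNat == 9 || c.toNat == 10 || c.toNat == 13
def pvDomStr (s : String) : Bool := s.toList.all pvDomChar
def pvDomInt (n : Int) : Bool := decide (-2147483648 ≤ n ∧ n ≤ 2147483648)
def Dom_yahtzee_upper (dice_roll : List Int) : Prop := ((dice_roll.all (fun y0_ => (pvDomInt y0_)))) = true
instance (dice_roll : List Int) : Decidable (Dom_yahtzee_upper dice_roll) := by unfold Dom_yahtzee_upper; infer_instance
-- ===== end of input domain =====

-- B replaces A's dict of running per-value sums plus a second max-scan over its items by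
-- sorting a copy and scanning consecutive equal runs once, tracking the best run sum and the
-- number of runs (alternative decomposition; not claimed faster).

-- ===== PORT A =====
def yahtzee_upper (dice_roll : List Int) : Int × Int :=
  let results_dict := dice_roll.foldl
    (fun d value => d.insert value (d.getD value 0 + value))
    (PySem.Dict.empty : PySem.Dict Int Int)
  let cur_max := results_dict.items.foldl
    (fun cur_max kv => if kv.2 > cur_max then kv.2 else cur_max) 0
  (cur_max, (PySem.Dict.size results_dict : Int))

-- ===== PORT B =====
-- loop body of B: state = (prev, run, best, distinct)
def bStep (st : Option Int × Int × Int × Int) (v : Int) : Option Int × Int × Int × Int :=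
  match st with
  | (prev, run, best, distinct) =>
    if prev = some v then (some v, run + v, best, distinct)
    else (some v, v, (if run > best then run else best), distinct + 1)

def yahtzee_upper_alt (dice_roll : List Int) : Int × Int :=
  let st := (PySem.List.sorted dice_roll (fun x => x) false).foldl bStep (none, 0, 0, 0)
  ((if st.2.1 > st.2.2.1 then st.2.1 else st.2.2.1), st.2.2.2)

-- ===== PRECONDITION & SPEC =====
def Spec_yahtzee_upper (dice_roll : List Int) (out : Int × Int) : Prop := out = yahtzee_upper_alt dice_roll
instance (dice_roll : List Int) (out : Int × Int) : Decidable (Spec_yahtzee_upper dice_roll out) := by unfold Spec_yahtzee_upper; infer_instance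

-- ===== CLAIM (what is proved, stated in full; the proofs are below) =====
def Claim_equal_yahtzee_upper : Prop := ∀ (dice_roll : List Int), Dom_yahtzee_upper dice_roll → Spec_yahtzee_upper dice_roll (yahtzee_upper dice_roll)

-- ===== LEMMAS AND PROOFS =====

-- running max (the `if v > cur_max` shape) of k*count(full,k) over candidate values ks
def runMax (full : List Int) (ks : List Int) (b : Int) : Int :=
  ks.foldl (fun m k =>
    if k * (full.count k : Int) > m
    then k * (full.count k : Int) else m) b

-- A's dict loop: final entry at v is v * (number of occurrences of v)
theorem a_getD (l : List Int) (d : PySem.Dict Int Int) (v : Int) :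
    (l.foldl (fun d x => d.insert x (d.getD x 0 + x)) d).getD v 0
      = d.getD v 0 + v * (l.count v : Int) := by
  induction l generalizing d with
  | nil => simp
  | cons x l ih =>
    simp only [List.foldl_cons, ih, PySem.Dict.getD_insert, List.count_cons]
    by_cases h : v = x
    · subst h; simp; ring
    · simp [h]
      exact Or.inl (Ne.symm h)

theorem yahtzee_upper_eq (l : List Int) :
    yahtzee_upper l = (runMax l (PySem.Set.ofList l) 0, ((PySem.Set.ofList l).length : Int)) := by
  unfold yahtzee_upper
  have hkeys : (l.foldl (fun d x => d.insert x (d.getD x 0 + x))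
      (PySem.Dict.empty : PySem.Dict Int Int)).keys = PySem.Set.ofList l := by
    rw [PySem.Dict.keys_foldl_insert]
    simp [PySem.Set.update_nil_left]
  have hnd : (l.foldl (fun d x => d.insert x (d.getD x 0 + x))
      (PySem.Dict.empty : PySem.Dict Int Int)).keys.Nodup := by
    rw [hkeys]; exact PySem.Set.nodup_ofList l
  have hitems : (l.foldl (fun d x => d.insert x (d.getD x 0 + x))
      (PySem.Dict.empty : PySem.Dict Int Int)).items
      = (PySem.Set.ofList l).map (fun k => (k, k * (l.count k : Int))) := by
    rw [PySem.Dict.items_eq_map_keys _ hnd 0, hkeys]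
    refine List.map_congr_left (fun k _ => ?_)
    rw [a_getD]
    simp
  simp only [hitems, List.foldl_map, PySem.Dict.size, List.length_map]
  rfl

-- runMax only looks at the counts of the candidates
theorem runMax_congr (full full' ks : List Int) (b : Int)
    (h : ∀ k ∈ ks, full.count k = full'.count k) :
    runMax full ks b = runMax full' ks b := by
  induction ks generalizing b with
  | nil => rfl
  | cons k t ih =>
    simp only [runMax, List.foldl_cons] at *
    rw [h k (by simp)]
    exact ih _ (fun k hk => h k (List.mem_cons_of_mem _ hk))

-- runMax is invariant under permutation of the candidate list
theorem runMax_perm (full ks ks' : List Int) (b : Int) (h : ks.Perm ks') :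
    runMax full ks b = runMax full ks' b := by
  unfold runMax
  exact h.foldl_eq' (fun x _ y _ z => by split_ifs <;> omega) b

-- folding a block of copies of v while prev = v just accumulates the run
theorem fold_run (t : List Int) (v run best d : Int)
    (h : ∀ x ∈ t, x = v) :
    t.foldl bStep (some v, run, best, d) = (some v, run + t.length * v, best, d) := by
  induction t generalizing run with
  | nil => simp
  | cons x t ih =>
    have hx : x = v := h x (by simp)
    subst hx
    have hstep : bStep (some x, run, best, d) x = (some x, run + x, best, d) := by
      simp [bStep]
    rw [List.foldl_cons, hstep, ih (run + x) (fun y hy => h y (List.mem_cons_of_mem _ hy))]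
    simp only [Prod.mk.injEq, true_and, and_true, List.length_cons]
    push_cast
    ring

-- the "finish" step B performs after the loop
def bFinish (st : Option Int × Int × Int × Int) : Int × Int :=
  ((if st.2.1 > st.2.2.1 then st.2.1 else st.2.2.1), st.2.2.2)

theorem discard_not_mem (s : List Int) (x : Int) (h : x ∉ s) :
    PySem.Set.discard s x = s := by
  simp only [PySem.Set.discard]
  refine List.filter_eq_self.mpr fun a ha => by
    simp only [Bool.not_eq_eq_eq_not, Bool.not_true, beq_eq_false_iff_ne, ne_eq]
    rintro rfl
    exact h ha

theorem dropWhile_head_false (p : Int → Bool) (l : List Int) (w : Int) (r : List Int)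
    (h : l.dropWhile p = w :: r) : p w = false := by
  induction l with
  | nil => simp at h
  | cons x t ih =>
    rw [List.dropWhile_cons] at h
    by_cases hp : p x
    · rw [if_pos hp] at h; exact ih h
    · rw [if_neg hp] at h
      cases h
      simpa using hp

-- ofList of a sorted-run decomposition
theorem ofList_run (t₁ t₂ : List Int) (v : Int)
    (h1 : ∀ x ∈ t₁, x = v) (h2 : v ∉ t₂) :
    PySem.Set.ofList (v :: (t₁ ++ t₂)) = v :: PySem.Set.ofList t₂ := by
  induction t₁ with
  | nil =>
    rw [List.nil_append, PySem.Set.ofList_cons,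
        discard_not_mem _ _ (by simp [PySem.Set.mem_ofList]; exact h2)]
  | cons x t ih =>
    have hx : x = v := h1 x (by simp)
    subst hx
    rw [List.cons_append, PySem.Set.ofList_cons,
        ih (fun y hy => h1 y (List.mem_cons_of_mem _ hy))]
    congr 1
    have hd : PySem.Set.discard (x :: PySem.Set.ofList t₂) x
        = PySem.Set.discard (PySem.Set.ofList t₂) x := by
      simp [PySem.Set.discard]
    rw [hd, discard_not_mem _ _ (by simp [PySem.Set.mem_ofList]; exact h2)]

-- main invariant of B's loop over the sorted list
theorem b_main : ∀ (n : Nat) (s : List Int), s.length ≤ n → s.Pairwise (· ≤ ·) →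
    ∀ (prev : Option Int) (run best d : Int),
    (∀ x ∈ s, ∀ p, prev = some p → p < x) →
    bFinish (s.foldl bStep (prev, run, best, d))
      = (runMax s (PySem.Set.ofList s) (if run > best then run else best),
         d + ((PySem.Set.ofList s).length : Int)) := by
  intro n
  induction n with
  | zero =>
    intro s hs _ prev run best d _
    have : s = [] := List.eq_nil_of_length_eq_zero (Nat.le_zero.mp hs)
    subst this
    simp [bFinish, runMax]
  | succ n ih =>
    intro s hs hsort prev run best d hprev
    match s with
    | [] => simp [bFinish, runMax]
    | v :: t =>
      have hne : ¬ (prev = some v) := by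
        intro h
        exact absurd (hprev v (by simp) v h) (lt_irrefl v)
      set t₁ := t.takeWhile (fun x => decide (x = v)) with ht₁
      set t₂ := t.dropWhile (fun x => decide (x = v)) with ht₂
      have hsplit : t = t₁ ++ t₂ := (List.takeWhile_append_dropWhile).symm
      have ht1v : ∀ x ∈ t₁, x = v := by
        intro x hx
        simpa using List.mem_takeWhile_imp hx
      have htle : ∀ x ∈ t, v ≤ x := by
        intro x hx
        exact (List.pairwise_cons.mp hsort).1 x hx
      have ht2sub : t₂.Sublist t := List.dropWhile_sublist _
      have ht2sort : t₂.Pairwise (· ≤ ·) :=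
        ((List.pairwise_cons.mp hsort).2).sublist ht2sub
      have ht2gt : ∀ x ∈ t₂, v < x := by
        intro x hx
        match h2 : t₂ with
        | [] => simp at hx
        | w :: r =>
          have hwne : ¬ (w = v) := by
            simpa using dropWhile_head_false (fun x => decide (x = v)) t w r ht₂.symm
          have hwv : v < w :=
            lt_of_le_of_ne (htle w (ht2sub.subset (by simp))) (Ne.symm hwne)
          rcases List.mem_cons.mp hx with h | h
          · exact h ▸ hwv
          · exact lt_of_lt_of_le hwv ((List.pairwise_cons.mp ht2sort).1 x h)
      have hvnot2 : v ∉ t₂ := fun h => absurd (ht2gt v h) (lt_irrefl v)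
      -- counts
      have hc1 : t₁.count v = t₁.length := List.count_eq_length.mpr (fun b hb => (ht1v b hb).symm)
      have hc2 : t₂.count v = 0 := List.count_eq_zero.mpr hvnot2
      have hcount : ((v :: t).count v : Int) = 1 + t₁.length := by
        rw [hsplit]
        simp [List.count_append, hc1, hc2]
        ring
      -- run the loop
      rw [List.foldl_cons]
      have hstep : bStep (prev, run, best, d) v
          = (some v, v, (if run > best then run else best), d + 1) := by
        simp [bStep, hne]
      rw [hstep, hsplit, List.foldl_append,
          fold_run t₁ v v (if run > best then run else best) (d + 1) ht1v]
      have ht2len : t₂.length ≤ n := by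
        have h1 : t₂.length ≤ t.length := ht2sub.length_le
        have h2 : t.length + 1 ≤ n + 1 := by simpa using hs
        omega
      rw [ih t₂ ht2len ht2sort (some v) (v + t₁.length * v)
            (if run > best then run else best) (d + 1)
            (fun x hx p hp => by cases hp; exact ht2gt x hx)]
      -- identify with the RHS
      rw [← hsplit]
      have hof : PySem.Set.ofList (v :: t) = v :: PySem.Set.ofList t₂ := by
        rw [hsplit]; exact ofList_run t₁ t₂ v ht1v hvnot2
      rw [hof]
      have hrm : runMax (v :: t) (v :: PySem.Set.ofList t₂)
            (if run > best then run else best)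
          = runMax t₂ (PySem.Set.ofList t₂)
            (if v + (t₁.length : Int) * v > (if run > best then run else best)
             then v + (t₁.length : Int) * v else (if run > best then run else best)) := by
        have hhead : v * ((v :: t).count v : Int) = v + (t₁.length : Int) * v := by
          rw [hcount]; ring
        unfold runMax
        rw [List.foldl_cons]
        rw [hhead]
        exact runMax_congr (v :: t) t₂ (PySem.Set.ofList t₂) _
          (fun k hk => by
            have hkt2 : k ∈ t₂ := (PySem.Set.mem_ofList _ _).mp hk
            have hkv : k ≠ v := fun h => absurd (ht2gt k hkt2) (h ▸ lt_irrefl v)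
            rw [hsplit]
            have hct1 : t₁.count k = 0 :=
              List.count_eq_zero.mpr (fun h => hkv ((ht1v k h)))
            have hvk : ¬ v = k := fun h => hkv h.symm
            simp [List.count_append, hct1, hvk])
      rw [hrm]
      simp only [List.length_cons, Prod.mk.injEq]
      refine ⟨trivial, ?_⟩
      push_cast
      ring

-- ===== VERDICT (by name: the statement is the Claim_ definition above) =====
theorem yahtzee_upper_spec : Claim_equal_yahtzee_upper := by
  intro l _
  unfold Spec_yahtzee_upper
  rw [yahtzee_upper_eq]
  show _ = bFinish ((PySem.List.sorted l (fun x => x) false).foldl bStep (none, 0, 0, 0))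
  rw [b_main (PySem.List.sorted l (fun x => x) false).length _ le_rfl
        (by simpa using PySem.List.sorted_pairwise l (fun x => x))
        none 0 0 0 (by intro x _ p hp; cases hp)]
  have hperm : (PySem.List.sorted l (fun x => x) false).Perm l := PySem.List.sorted_perm _ _ _
  have hof : (PySem.Set.ofList (PySem.List.sorted l (fun x => x) false)).Perm (PySem.Set.ofList l) := by
    apply List.perm_of_nodup_nodup_toFinset_eq (PySem.Set.nodup_ofList _) (PySem.Set.nodup_ofList _)
    ext x
    simp [PySem.Set.mem_ofList, hperm.mem_iff]
  simp only [Prod.mk.injEq]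
  constructor
  · have h0 : (if (0 : Int) > 0 then (0 : Int) else 0) = 0 := by norm_num
    rw [h0]
    symm
    rw [runMax_congr (PySem.List.sorted l (fun x => x) false) l (PySem.Set.ofList (PySem.List.sorted l (fun x => x) false)) 0
          (fun k _ => hperm.count_eq k),
        runMax_perm _ _ _ _ hof]
  · rw [hof.length_eq]
    ring
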